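-- pv_equiv track=rewrite | github.com/TimeLance89/Test-Git-Jester | app.py | _parse_days_of_week
-- ===== SOURCE A (Python) =====
-- def _parse_days_of_week(days: str | None) -> list[int]:
--     """Wandelt eine kommaseparierte Liste von Wochentagen in Integer um."""
--
--     if not days:
--         return []
--
--     parsed: set[int] = set()
--     for entry in days.split(","):
--         entry = entry.strip()
--         if not entry:
--             continue
--         try:
--             day = int(entry)
--         except ValueError:
--             continue
--         if 0 <= day <= 6:
--             parsed.add(day)
--     return sorted(parsed)
-- ===== SOURCE B (Python) =====
-- def _parse_days_of_week(days):
--     """Wandelt eine kommaseparierte Liste von Wochentagen in Integer um."""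
--     if not days:
--         return []
--     tokens = days.split(",")
--
--     def mentions(d):
--         for tok in tokens:
--             tok = tok.strip()
--             if not tok:
--                 continue
--             try:
--                 if int(tok) == d:
--                     return True
--             except ValueError:
--                 continue
--         return False
--
--     return [d for d in range(7) if mentions(d)]
-- ===== Notes on version B (the rewrite author's own statement) =====
-- stated objective: alternative
-- what changed: Inverts the loops: instead of accumulating valid tokens into a set and sorting it, B iterates over the seven candidate days 0..6 in ascending order and keeps each day iff some token parses to it, so no set, no presence array and no sort exist.
import Mathlib
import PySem

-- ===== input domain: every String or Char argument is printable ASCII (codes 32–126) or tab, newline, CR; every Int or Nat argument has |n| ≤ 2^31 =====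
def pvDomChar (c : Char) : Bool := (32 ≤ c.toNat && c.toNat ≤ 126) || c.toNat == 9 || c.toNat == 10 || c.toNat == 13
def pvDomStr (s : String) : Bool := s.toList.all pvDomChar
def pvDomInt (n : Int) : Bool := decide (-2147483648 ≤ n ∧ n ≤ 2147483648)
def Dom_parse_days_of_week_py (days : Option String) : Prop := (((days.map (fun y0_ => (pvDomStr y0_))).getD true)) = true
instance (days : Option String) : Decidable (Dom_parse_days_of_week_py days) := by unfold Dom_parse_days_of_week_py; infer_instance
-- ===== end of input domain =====

-- B inverts the loops: it scans candidate days 0..6 in order and keeps each day some token parses to, with no set and no sort (alternative).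

-- ===== PORT A =====
def pvAStep (acc : PySem.Set Int) (entry : String) : PySem.Set Int :=
  let e := PySem.Str.strip entry
  if e = "" then acc
  else
    match PySem.Int.ofStr? e with
    | none => acc
    | some day => if 0 ≤ day ∧ day ≤ 6 then PySem.Set.add acc day else acc

def parse_days_of_week_py (days : Option String) : List Int :=
  match days with
  | none => []
  | some s =>
    if s = "" then []
    else
      PySem.List.sorted (((PySem.Str.split? s ",").getD []).foldl pvAStep PySem.Set.empty)
        (fun x => x) false

-- ===== PORT B =====
-- per-token body of B's `mentions` loop: does this token parse to d?
def pvTok (tok : String) (d : Int) : Bool :=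
  let t := PySem.Str.strip tok
  if t = "" then false
  else
    match PySem.Int.ofStr? t with
    | none => false
    | some v => v == d

def pvMentions (tokens : List String) (d : Int) : Bool :=
  tokens.any (fun tok => pvTok tok d)

def parse_days_of_week_py_alt (days : Option String) : List Int :=
  match days with
  | none => []
  | some s =>
    if s = "" then []
    else
      let tokens := (PySem.Str.split? s ",").getD []
      (PySem.List.pyRange 0 7 1).filter (fun d => pvMentions tokens d)

-- ===== PRECONDITION & SPEC =====
def Spec_parse_days_of_week_py (days : Option String) (out : List Int) : Prop := out = parse_days_of_week_py_alt days
instance (days : Option String) (out : List Int) : Decidable (Spec_parse_days_of_week_py days out) := by unfold Spec_parse_days_of_week_py; infer_instance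

-- ===== CLAIM (what is proved, stated in full; the proofs are below) =====
def Claim_equal_parse_days_of_week_py : Prop := ∀ (days : Option String), Dom_parse_days_of_week_py days → Spec_parse_days_of_week_py days (parse_days_of_week_py days)

-- ===== LEMMAS AND PROOFS =====

lemma pvA_nodup (entries : List String) : ∀ s : List Int, s.Nodup → (entries.foldl pvAStep s).Nodup := by
  induction entries with
  | nil => intro s h; exact h
  | cons e rest ih =>
    intro s h
    apply ih
    unfold pvAStep
    by_cases he : PySem.Str.strip e = ""
    · simpa [he]
    · simp only [he, if_false]
      cases hp : PySem.Int.ofStr? (PySem.Str.strip e) with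
      | none => exact h
      | some day =>
        dsimp only
        split_ifs with hr
        · exact PySem.Set.nodup_add s day h
        · exact h

lemma pvA_mem (entries : List String) : ∀ (s : List Int) (x : Int),
    x ∈ entries.foldl pvAStep s ↔ x ∈ s ∨ (0 ≤ x ∧ x ≤ 6 ∧ pvMentions entries x = true) := by
  induction entries with
  | nil => intro s x; simp [pvMentions]
  | cons e rest ih =>
    intro s x
    rw [List.foldl_cons, ih]
    have hstep : x ∈ pvAStep s e ↔ x ∈ s ∨ (0 ≤ x ∧ x ≤ 6 ∧ pvTok e x = true) := by
      unfold pvAStep pvTok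
      by_cases he : PySem.Str.strip e = ""
      · simp [he]
      · simp only [he, if_false]
        cases hp : PySem.Int.ofStr? (PySem.Str.strip e) with
        | none => simp
        | some day =>
          dsimp only
          split_ifs with hr
          · rw [PySem.Set.mem_add]
            constructor
            · rintro (h | h)
              · exact Or.inl h
              · subst h; exact Or.inr ⟨hr.1, hr.2, by simp⟩
            · rintro (h | ⟨_, _, h⟩)
              · exact Or.inl h
              · simp only [beq_iff_eq] at h; exact Or.inr h.symm
          · constructor
            · exact Or.inl
            · rintro (h | ⟨h0, h6, h⟩)
              · exact h
              · simp only [beq_iff_eq] at h; subst h; exact absurd ⟨h0, h6⟩ hr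
    have hm : pvMentions (e :: rest) x = (pvTok e x || pvMentions rest x) := by
      simp [pvMentions]
    rw [hstep, hm]
    constructor
    · rintro ((h | ⟨h0, h6, ht⟩) | ⟨h0, h6, hr⟩)
      · exact Or.inl h
      · exact Or.inr ⟨h0, h6, by simp [ht]⟩
      · exact Or.inr ⟨h0, h6, by simp [hr]⟩
    · rintro (h | ⟨h0, h6, hor⟩)
      · exact Or.inl (Or.inl h)
      · rcases Bool.or_eq_true_iff.mp hor with ht | hr
        · exact Or.inl (Or.inr ⟨h0, h6, ht⟩)
        · exact Or.inr ⟨h0, h6, hr⟩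

lemma pvRange07 : PySem.List.pyRange 0 7 1 = [0, 1, 2, 3, 4, 5, 6] := by decide

lemma pvFinal (tokens : List String) :
    PySem.List.sorted (tokens.foldl pvAStep PySem.Set.empty) (fun x => x) false
    = (PySem.List.pyRange 0 7 1).filter (fun d => pvMentions tokens d) := by
  rw [pvRange07]
  apply PySem.List.sorted_eq_of_perm_of_pairwise_lt
  · refine (List.perm_ext_iff_of_nodup (List.Nodup.filter _ (by decide))
      (pvA_nodup tokens [] List.nodup_nil)).mpr ?_
    intro a
    rw [List.mem_filter, pvA_mem]
    simp only [List.not_mem_nil, false_or, List.mem_cons, List.not_mem_nil, or_false]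
    constructor
    · rintro ⟨hmem, hm⟩
      refine ⟨?_, ?_, hm⟩ <;> omega
    · rintro ⟨h0, h6, hm⟩
      exact ⟨by omega, hm⟩
  · exact List.Pairwise.filter _ (by decide)

-- ===== VERDICT (by name: the statement is the Claim_ definition above) =====
theorem parse_days_of_week_py_spec : Claim_equal_parse_days_of_week_py := by
  intro days _
  unfold Spec_parse_days_of_week_py parse_days_of_week_py parse_days_of_week_py_alt
  cases days with
  | none => rfl
  | some s =>
    by_cases hs : s = ""
    · simp [hs]
    · simp only [hs, if_false]
      exact pvFinal _
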